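-- pv_equiv track=rewrite | github.com/AP-MI-2021/lab-2-cosmina16 | main.py | is_antipalindrome
-- ===== SOURCE A (Python) =====
-- def det_putere_10(n):
--     putere=1
--     while n>9:
--         putere*=10
--         n//=10
--     return putere
--
-- def is_antipalindrome(n):
--     '''
--     Verifica daca un numar este antipalindrom
--     :param n: un numar intreg
--     :return: true daca numarul este antipalindorm sau false in caz contrar
--     '''
--     putere1=det_putere_10(n)
--     putere2=1
--     while putere1>putere2*10:
--         if (n//putere1)%10==(n//putere2)%10:
--             return False
--         else:
--             putere1//=10
--             putere2*=10
--     if putere1==putere2*10 and (n//putere1)%10==(n//(putere2))%10: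
--         return False
--     return True
-- ===== SOURCE B (Python) =====
-- def is_antipalindrome(n):
--     '''
--     Verifica daca un numar este antipalindrom
--     :param n: un numar intreg
--     :return: true daca numarul este antipalindorm sau false in caz contrar
--     '''
--     ds = []
--     while n > 0:
--         ds.append(n % 10)
--         n //= 10
--     for i in range(len(ds) // 2):
--         if ds[i] == ds[-1 - i]:
--             return False
--     return True
-- ===== Notes on version B (the rewrite author's own statement) =====
-- stated objective: alternative
-- what changed: B extracts the digits once into a list with repeated divmod and compares mirrored list positions by index, instead of A's synchronized pair of power-of-10 counters with repeated quotient/remainder digit extraction inside the loop.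
import Mathlib
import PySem

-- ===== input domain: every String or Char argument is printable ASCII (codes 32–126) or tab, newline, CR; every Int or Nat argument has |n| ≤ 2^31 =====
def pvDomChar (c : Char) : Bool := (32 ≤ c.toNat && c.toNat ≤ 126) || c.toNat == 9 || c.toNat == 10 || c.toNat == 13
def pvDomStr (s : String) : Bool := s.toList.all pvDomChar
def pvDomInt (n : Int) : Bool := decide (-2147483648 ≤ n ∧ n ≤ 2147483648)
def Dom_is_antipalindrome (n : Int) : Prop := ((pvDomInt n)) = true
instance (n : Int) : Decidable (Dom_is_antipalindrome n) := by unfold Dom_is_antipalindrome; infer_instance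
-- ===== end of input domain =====

-- B builds the digit list once and compares mirrored indices, replacing A's two power-of-10
-- counters with quotient digit extraction; same return value on every Int (total equivalence).

-- ===== PORT A =====
-- the `while n > 9` loop of det_putere_10; `putere` is the loop accumulator
def detLoop (n putere : Int) : Int :=
  if _h : n > 9 then detLoop (PySem.Int.floordiv n 10) (putere * 10) else putere
termination_by n.toNat
decreasing_by
  rw [PySem.Int.floordiv_eq_ediv_of_pos (by omega : (0:Int) < 10)]
  omega

def det_putere_10 (n : Int) : Int := detLoop n 1

-- the main `while putere1 > putere2*10` loop, followed by the final `if` when the loop exits;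
-- the proof argument `hp2 : 1 ≤ p2` records that putere2 stays ≥ 1 (true at every call site,
-- since putere2 starts at 1 and is only multiplied by 10), which the loop needs to terminate
def apLoop (n p1 p2 : Int) (hp2 : 1 ≤ p2) : Bool :=
  if _h : p1 > p2 * 10 then
    if PySem.Int.mod (PySem.Int.floordiv n p1) 10 == PySem.Int.mod (PySem.Int.floordiv n p2) 10 then
      false
    else
      apLoop n (PySem.Int.floordiv p1 10) (p2 * 10) (by omega)
  else
    if p1 == p2 * 10 && (PySem.Int.mod (PySem.Int.floordiv n p1) 10 == PySem.Int.mod (PySem.Int.floordiv n p2) 10) then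
      false
    else
      true
termination_by p1.toNat
decreasing_by
  rw [PySem.Int.floordiv_eq_ediv_of_pos (by omega : (0:Int) < 10)]
  omega

def is_antipalindrome (n : Int) : Bool :=
  apLoop n (det_putere_10 n) 1 (by omega)

-- ===== PORT B =====
-- `while n > 0: ds.append(n % 10); n //= 10` — the digit list, least-significant digit first
def digitsLoop (n : Int) : List Int :=
  if _h : n > 0 then PySem.Int.mod n 10 :: digitsLoop (PySem.Int.floordiv n 10) else []
termination_by n.toNat
decreasing_by
  rw [PySem.Int.floordiv_eq_ediv_of_pos (by omega : (0:Int) < 10)]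
  omega

-- `for i in range(len(ds)//2): if ds[i] == ds[-1-i]: return False` then `return True`
def is_antipalindrome_alt (n : Int) : Bool :=
  let ds := digitsLoop n
  (List.range (ds.length / 2)).all
    (fun i => !(PySem.List.pyGet? ds (i : Int) == PySem.List.pyGet? ds (-1 - (i : Int))))

-- ===== PRECONDITION & SPEC =====
def Spec_is_antipalindrome (n : Int) (out : Bool) : Prop := out = is_antipalindrome_alt n
instance (n : Int) (out : Bool) : Decidable (Spec_is_antipalindrome n out) := by unfold Spec_is_antipalindrome; infer_instance

-- ===== CLAIM (what is proved, stated in full; the proofs are below) =====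
def Claim_equal_is_antipalindrome : Prop := ∀ (n : Int), Dom_is_antipalindrome n → Spec_is_antipalindrome n (is_antipalindrome n)

-- ===== LEMMAS AND PROOFS =====

-- Nat shadows of the three loops (all Python values involved are nonnegative there)
def natDigits (m : Nat) : List Nat :=
  if 0 < m then m % 10 :: natDigits (m / 10) else []
termination_by m
decreasing_by exact Nat.div_lt_self (by omega) (by omega)

def natDet (m p : Nat) : Nat :=
  if 9 < m then natDet (m / 10) (p * 10) else p
termination_by m
decreasing_by exact Nat.div_lt_self (by omega) (by omega)

def natLoop (m p1 p2 : Nat) : Bool :=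
  if p2 * 10 < p1 then
    if m / p1 % 10 == m / p2 % 10 then false else natLoop m (p1 / 10) (p2 * 10)
  else
    if p1 == p2 * 10 && (m / p1 % 10 == m / p2 % 10) then false else true
termination_by p1
decreasing_by exact Nat.div_lt_self (by omega) (by omega)

-- the i-th digit of m, counting from the least significant end
def dg (m i : Nat) : Nat := m / 10 ^ i % 10

theorem dg_succ (m i : Nat) : dg m (i + 1) = dg (m / 10) i := by
  simp [dg, Nat.div_div_eq_div_mul, pow_succ, mul_comm]

theorem natDigits_length_pos (m : Nat) (h : 0 < m) : 0 < (natDigits m).length := by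
  rw [natDigits]; simp [h]

theorem natDigits_get (m i : Nat) (h : i < (natDigits m).length) :
    (natDigits m)[i] = dg m i := by
  induction m using Nat.strong_induction_on generalizing i with
  | _ m ih =>
    by_cases hm : 0 < m
    · have hcons : natDigits m = m % 10 :: natDigits (m / 10) := by rw [natDigits, if_pos hm]
      rw [hcons] at h
      simp only [hcons]
      cases i with
      | zero => simp [dg]
      | succ j =>
        simp only [List.getElem_cons_succ]
        rw [ih (m / 10) (Nat.div_lt_self hm (by omega)) j (by simpa using h), dg_succ]
    · rw [natDigits, if_neg hm] at h; simp at h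

theorem natDet_eq (m : Nat) (h : 0 < m) (p : Nat) :
    natDet m p = p * 10 ^ ((natDigits m).length - 1) := by
  induction m using Nat.strong_induction_on generalizing p with
  | _ m ih =>
    have hcons : natDigits m = m % 10 :: natDigits (m / 10) := by rw [natDigits, if_pos h]
    rw [natDet, hcons]
    by_cases h9 : 9 < m
    · have hq : 0 < m / 10 := by omega
      rw [if_pos h9, ih (m / 10) (Nat.div_lt_self h (by omega)) hq (p * 10)]
      obtain ⟨l, hl⟩ : ∃ l, (natDigits (m / 10)).length = l + 1 :=
        ⟨_, (Nat.succ_pred_eq_of_pos (natDigits_length_pos _ hq)).symm⟩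
      rw [hl, List.length_cons, hl]
      simp only [Nat.add_sub_cancel, pow_succ]
      ring
    · have hz : m / 10 = 0 := by omega
      rw [if_neg h9, hz]
      simp [natDigits]

-- the main loop compares the digit pairs (a+b-i, i) for i = b, b+1, … (⌊(a+1-b)/2⌋ of them)
theorem natLoop_eq (a : Nat) : ∀ (b m : Nat),
    natLoop m (10 ^ a) (10 ^ b) =
      (List.range' b ((a + 1 - b) / 2)).all (fun i => !(dg m (a + b - i) == dg m i)) := by
  induction a with
  | zero =>
    intro b m
    have h10 : (1:Nat) ≤ 10 ^ b := Nat.one_le_pow _ _ (by omega)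
    rw [natLoop, if_neg (by omega : ¬ 10 ^ b * 10 < 10 ^ 0)]
    have h2 : (10 ^ 0 == 10 ^ b * 10) = false := by simp; omega
    rw [h2, Bool.false_and, if_neg (by simp)]
    have h3 : (0 + 1 - b) / 2 = 0 := by omega
    simp [h3]
  | succ a ih =>
    intro b m
    have hps : 10 ^ b * 10 = 10 ^ (b + 1) := by rw [pow_succ]
    rw [natLoop]
    rcases lt_trichotomy b a with hb | hb | hb
    · -- loop iterates: compare pair (a+1, b) then recurse with (10^a, 10^(b+1))
      have hcond : 10 ^ b * 10 < 10 ^ (a + 1) := by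
        rw [hps]; exact Nat.pow_lt_pow_right (by omega) (by omega)
      have hdivs : 10 ^ (a + 1) / 10 = 10 ^ a := by
        rw [pow_succ, Nat.mul_div_cancel _ (by omega)]
      rw [if_pos hcond, hdivs, hps, ih (b + 1) m]
      have hk : (a + 1 + 1 - b) / 2 = (a + 1 - (b + 1)) / 2 + 1 := by omega
      rw [hk, List.range'_succ, List.all_cons]
      have hm1 : a + 1 + b - b = a + 1 := by omega
      have hpred : ∀ i : Nat, a + (b + 1) - i = a + 1 + b - i := by omega
      simp only [hpred, hm1, dg]
      by_cases heq : m / 10 ^ (a + 1) % 10 = m / 10 ^ b % 10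
      · simp [heq]
      · simp [heq]
    · -- adjacent powers: the final `if` compares the pair (a+1, b) with b = a
      subst hb
      rw [if_neg (by rw [hps]; exact lt_irrefl _), hps]
      have heqp : (10 ^ (b + 1) == 10 ^ (b + 1)) = true := by simp
      rw [heqp, Bool.true_and]
      have hk : (b + 1 + 1 - b) / 2 = 1 := by omega
      have hm1 : b + 1 + b - b = b + 1 := by omega
      rw [hk, List.range'_one]
      simp only [List.all_cons, List.all_nil, hm1, dg]
      by_cases heq : m / 10 ^ (b + 1) % 10 = m / 10 ^ b % 10
      · simp [heq]
      · simp [heq]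
    · -- p1 ≤ p2: no comparison left
      have hcond : ¬ 10 ^ b * 10 < 10 ^ (a + 1) := by
        rw [hps]
        exact not_lt.mpr (Nat.pow_le_pow_right (by omega) (by omega))
      have heqp : (10 ^ (a + 1) == 10 ^ b * 10) = false := by
        rw [hps]
        simp only [beq_eq_false_iff_ne, ne_eq]
        intro hcontra
        have := Nat.pow_right_injective (by omega : 2 ≤ 10) hcontra
        omega
      rw [if_neg hcond, heqp, Bool.false_and, if_neg (by simp)]
      have hk : (a + 1 + 1 - b) / 2 = 0 := by omega
      simp [hk]

-- ==== bridges between the Int ports and the Nat shadows ====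

theorem floordiv_cast (m k : Nat) : PySem.Int.floordiv (m : Int) (k : Int) = ((m / k : Nat) : Int) :=
  PySem.Int.floordiv_natCast m k

theorem mod_cast' (m k : Nat) : PySem.Int.mod (m : Int) (k : Int) = ((m % k : Nat) : Int) :=
  PySem.Int.mod_natCast m k

theorem detLoop_eq_natDet (m : Nat) : ∀ (p : Nat), detLoop (m : Int) (p : Int) = ((natDet m p : Nat) : Int) := by
  induction m using Nat.strong_induction_on with
  | _ m ih =>
    intro p
    rw [detLoop, natDet]
    by_cases h9 : 9 < m
    · have hgt : (m : Int) > 9 := by exact_mod_cast h9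
      have h10 : (10 : Int) = ((10 : Nat) : Int) := by norm_num
      simp only [hgt, dif_pos, if_pos h9, h10, floordiv_cast]
      rw [show ((p : Int) * ((10:Nat):Int)) = (((p * 10 : Nat)) : Int) by push_cast; ring]
      exact ih (m / 10) (Nat.div_lt_self (by omega) (by omega)) (p * 10)
    · have hgt : ¬ (m : Int) > 9 := by exact_mod_cast h9
      simp [hgt, h9]

theorem apLoop_eq_natLoop (p1 : Nat) : ∀ (m p2 : Nat) (h2 : (1:Int) ≤ (p2 : Int)),
    apLoop (m : Int) (p1 : Int) (p2 : Int) h2 = natLoop m p1 p2 := by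
  induction p1 using Nat.strong_induction_on with
  | _ p1 ih =>
    intro m p2 h2
    have hp2 : 1 ≤ p2 := by exact_mod_cast h2
    have e1 : PySem.Int.mod (PySem.Int.floordiv (m:Int) (p1:Int)) 10 = ((m / p1 % 10 : Nat) : Int) := by
      rw [floordiv_cast]; exact_mod_cast mod_cast' (m / p1) 10
    have e2 : PySem.Int.mod (PySem.Int.floordiv (m:Int) (p2:Int)) 10 = ((m / p2 % 10 : Nat) : Int) := by
      rw [floordiv_cast]; exact_mod_cast mod_cast' (m / p2) 10
    have ebeq : ((((m / p1 % 10 : Nat)) : Int) == (((m / p2 % 10 : Nat)) : Int)) = ((m / p1 % 10) == (m / p2 % 10)) := by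
      simp only [beq_eq_decide, Nat.cast_inj]
    by_cases hc : p2 * 10 < p1
    · have hc' : (m : Int) > 0 ∨ True := Or.inr trivial
      have hcI : (p1 : Int) > (p2 : Int) * 10 := by omega
      rw [apLoop, natLoop, dif_pos hcI, if_pos hc, e1, e2, ebeq]
      by_cases heq : (m / p1 % 10 == m / p2 % 10) = true
      · rw [if_pos heq, if_pos heq]
      · rw [if_neg heq, if_neg heq]
        have hrec := ih (p1 / 10) (Nat.div_lt_self (by omega) (by omega)) m (p2 * 10)
          (by omega)
        simp only [show PySem.Int.floordiv (p1:Int) 10 = ((p1 / 10 : Nat) : Int) from by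
            exact_mod_cast floordiv_cast p1 10,
          show ((p2:Int)) * 10 = ((p2 * 10 : Nat) : Int) from by push_cast; ring]
        exact hrec
    · have hcI : ¬ (p1 : Int) > (p2 : Int) * 10 := by omega
      rw [apLoop, natLoop, dif_neg hcI, if_neg hc, e1, e2, ebeq]
      have he : ((p1:Int) == (p2:Int) * 10) = (p1 == p2 * 10) := by
        by_cases h : p1 = p2 * 10
        · subst h; push_cast; simp
        · have h' : (p1:Int) ≠ (p2:Int) * 10 := by omega
          simp [h, h']
      rw [he]

theorem digitsLoop_eq_natDigits (m : Nat) :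
    digitsLoop (m : Int) = (natDigits m).map Int.ofNat := by
  induction m using Nat.strong_induction_on with
  | _ m ih =>
    rw [digitsLoop, natDigits]
    by_cases h : 0 < m
    · have hgt : (m : Int) > 0 := by exact_mod_cast h
      have h10 : (10 : Int) = ((10 : Nat) : Int) := by norm_num
      simp only [hgt, dif_pos, if_pos h, h10, floordiv_cast, mod_cast', List.map_cons]
      rw [ih (m / 10) (Nat.div_lt_self h (by omega))]
      simp [Int.ofNat_eq_natCast]
    · have hgt : ¬ (m : Int) > 0 := by exact_mod_cast h
      simp [h]

-- B's two indexings, on the digit list of a positive number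
theorem pyGet_front (ds : List Int) (i : Nat) (h : i < ds.length) :
    PySem.List.pyGet? ds (i : Int) = some ds[i] := by
  rw [PySem.List.pyGet?_natCast, List.getElem?_eq_getElem h]

theorem pyGet_back (ds : List Int) (i : Nat) (h : i < ds.length) :
    PySem.List.pyGet? ds (-1 - (i : Int)) = some ds[ds.length - 1 - i] := by
  have h1 : ¬ (0:Int) ≤ -1 - (i : Int) := by omega
  have h2 : -((ds.length : Nat) : Int) ≤ -1 - (i : Int) := by omega
  have h3 : (-(-1 - (i : Int))).toNat = i + 1 := by omega
  simp only [PySem.List.pyGet?, PySem.List.pyIdx?, h1, if_neg, h2, if_pos, h3,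
    not_false_eq_true]
  rw [show ds.length - (i + 1) = ds.length - 1 - i from by omega]
  simp [List.getElem?_eq_getElem (show ds.length - 1 - i < ds.length from by omega)]

theorem all_range_congr (k : Nat) (p q : Nat → Bool) (h : ∀ i, i < k → p i = q i) :
    (List.range k).all p = (List.range k).all q := by
  induction k with
  | zero => simp
  | succ k ih =>
    rw [List.range_succ]
    simp only [List.all_append, List.all_cons, List.all_nil]
    rw [ih (fun i hi => h i (by omega)), h k (by omega)]

-- the two programs on a positive number, both reduced to mirrored digit comparisons
theorem main_pos (m : Nat) (hm : 0 < m) :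
    is_antipalindrome (m : Int) = is_antipalindrome_alt (m : Int) := by
  set L := (natDigits m).length with hL
  have hL1 : 0 < L := natDigits_length_pos m hm
  -- side A
  have hdet : det_putere_10 (m : Int) = ((natDet m 1 : Nat) : Int) := by
    rw [det_putere_10, show (1:Int) = ((1:Nat):Int) by norm_num, detLoop_eq_natDet]
  have hA : is_antipalindrome (m : Int) = natLoop m (natDet m 1) 1 := by
    rw [is_antipalindrome, hdet]
    exact apLoop_eq_natLoop (natDet m 1) m 1 (by norm_num)
  rw [hA, natDet_eq m hm 1, one_mul, ← hL]
  rw [show natLoop m (10 ^ (L - 1)) 1 = natLoop m (10 ^ (L - 1)) (10 ^ 0) from by norm_num,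
    natLoop_eq (L - 1) 0 m]
  have hcnt : (L - 1 + 1 - 0) / 2 = L / 2 := by omega
  rw [hcnt, show List.range' 0 (L / 2) = List.range (L / 2) from List.range_eq_range'.symm]
  -- side B
  rw [is_antipalindrome_alt]
  simp only [digitsLoop_eq_natDigits m, List.length_map]
  rw [← hL]
  apply all_range_congr
  intro i hi
  have hiL : i < ((natDigits m).map Int.ofNat).length := by
    rw [List.length_map, ← hL]; omega
  rw [pyGet_front _ i hiL, pyGet_back _ i hiL]
  simp only [List.getElem_map, List.length_map, ← hL, natDigits_get, Nat.add_zero,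
    beq_eq_decide]
  refine congrArg (fun b => !b) (decide_eq_decide.mpr ?_)
  simp only [Option.some.injEq]
  exact ⟨fun h => congrArg Int.ofNat h.symm, fun h => (Int.ofNat.inj h).symm⟩

theorem main_nonpos (n : Int) (hn : n ≤ 0) :
    is_antipalindrome n = is_antipalindrome_alt n := by
  have h9 : ¬ n > 9 := by omega
  have h0 : ¬ n > 0 := by omega
  rw [is_antipalindrome, det_putere_10, detLoop, dif_neg h9, apLoop, is_antipalindrome_alt,
    digitsLoop, dif_neg h0]
  norm_num

-- ===== VERDICT (by name: the statement is the Claim_ definition above) =====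
theorem is_antipalindrome_spec : Claim_equal_is_antipalindrome := by
  intro n _
  unfold Spec_is_antipalindrome
  by_cases h : n ≤ 0
  · exact main_nonpos n h
  · have : n = ((n.toNat : Nat) : Int) := by omega
    rw [this]
    exact main_pos n.toNat (by omega)
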